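-- pv_equiv track=rewrite | github.com/b3npaii/transfer-to-vs-code-main | src/rook.py | sortSides
-- ===== SOURCE A (Python) =====
-- def sortSides(sides, row, col):
--     left, right, up, down = [], [], [], []
--     for x, y in sides:
--         if x < row:
--             left.append((x, y))
--         elif x > row:
--             right.append((x, y))
--         elif y > col:
--             down.append((x, y))
--         elif y < col:
--             up.append((x, y))
--     return left[::-1], right, up[::-1], down
-- ===== SOURCE B (Python) =====
-- def sortSides(sides, row, col):
--     left = [p for p in sides if p[0] < row][::-1]
--     right = [p for p in sides if p[0] > row]
--     up = [p for p in sides if p[0] == row and p[1] < col][::-1]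
--     down = [p for p in sides if p[0] == row and p[1] > col]
--     return left, right, up, down
-- ===== Notes on version B (the rewrite author's own statement) =====
-- stated objective: alternative
-- what changed: Replaces the single branched accumulator loop by four independent filter passes (one comprehension per direction) with the reversals applied to the filtered lists.
import Mathlib
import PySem

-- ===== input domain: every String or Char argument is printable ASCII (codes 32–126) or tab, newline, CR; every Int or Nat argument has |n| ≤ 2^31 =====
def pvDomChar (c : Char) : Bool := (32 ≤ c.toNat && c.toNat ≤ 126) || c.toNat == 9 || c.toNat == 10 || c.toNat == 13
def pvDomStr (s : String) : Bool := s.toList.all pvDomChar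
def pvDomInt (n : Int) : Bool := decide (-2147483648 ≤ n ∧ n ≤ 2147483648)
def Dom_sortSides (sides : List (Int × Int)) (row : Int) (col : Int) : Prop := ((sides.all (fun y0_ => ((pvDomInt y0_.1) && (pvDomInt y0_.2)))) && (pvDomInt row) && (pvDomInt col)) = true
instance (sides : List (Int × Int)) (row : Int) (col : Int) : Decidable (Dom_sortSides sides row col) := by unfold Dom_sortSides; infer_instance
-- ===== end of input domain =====

-- ===== PORT A =====
-- Literal port of A: one fold over `sides` threading the four accumulators
-- through the elif chain, then left[::-1] and up[::-1] as List.reverse.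
def sortSides (sides : List (Int × Int)) (row : Int) (col : Int) : (List (Int × Int)) × (List (Int × Int)) × (List (Int × Int)) × (List (Int × Int)) :=
  let acc := sides.foldl
    (fun (st : (List (Int × Int)) × (List (Int × Int)) × (List (Int × Int)) × (List (Int × Int))) p =>
      let (l, r, u, d) := st
      if p.1 < row then (l ++ [p], r, u, d)
      else if p.1 > row then (l, r ++ [p], u, d)
      else if p.2 > col then (l, r, u, d ++ [p])
      else if p.2 < col then (l, r, u ++ [p], d)
      else (l, r, u, d))
    ([], [], [], [])
  (acc.1.reverse, acc.2.1, acc.2.2.1.reverse, acc.2.2.2)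

-- ===== PORT B =====
-- Literal port of B: four independent filter passes, reversing left and up.
def sortSides_alt (sides : List (Int × Int)) (row : Int) (col : Int) : (List (Int × Int)) × (List (Int × Int)) × (List (Int × Int)) × (List (Int × Int)) :=
  ((sides.filter (fun p => p.1 < row)).reverse,
   (sides.filter (fun p => p.1 > row)),
   (sides.filter (fun p => p.1 == row && p.2 < col)).reverse,
   (sides.filter (fun p => p.1 == row && p.2 > col)))

-- ===== PRECONDITION & SPEC =====
def Spec_sortSides (sides : List (Int × Int)) (row : Int) (col : Int) (out : (List (Int × Int)) × (List (Int × Int)) × (List (Int × Int)) × (List (Int × Int))) : Prop := out = sortSides_alt sides row col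
instance (sides : List (Int × Int)) (row : Int) (col : Int) (out : (List (Int × Int)) × (List (Int × Int)) × (List (Int × Int)) × (List (Int × Int))) : Decidable (Spec_sortSides sides row col out) := by unfold Spec_sortSides; infer_instance

-- ===== CLAIM (what is proved, stated in full; the proofs are below) =====
def Claim_equal_sortSides : Prop := ∀ (sides : List (Int × Int)) (row : Int) (col : Int), Dom_sortSides sides row col → Spec_sortSides sides row col (sortSides sides row col)

-- ===== LEMMAS AND PROOFS =====

theorem sortSides_foldl (sides : List (Int × Int)) (row col : Int)
    (l r u d : List (Int × Int)) :
    sides.foldl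
      (fun (st : (List (Int × Int)) × (List (Int × Int)) × (List (Int × Int)) × (List (Int × Int))) p =>
        let (l, r, u, d) := st
        if p.1 < row then (l ++ [p], r, u, d)
        else if p.1 > row then (l, r ++ [p], u, d)
        else if p.2 > col then (l, r, u, d ++ [p])
        else if p.2 < col then (l, r, u ++ [p], d)
        else (l, r, u, d))
      (l, r, u, d)
    = (l ++ sides.filter (fun p => p.1 < row),
       r ++ sides.filter (fun p => p.1 > row),
       u ++ sides.filter (fun p => p.1 == row && p.2 < col),
       d ++ sides.filter (fun p => p.1 == row && p.2 > col)) := by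
  induction sides generalizing l r u d with
  | nil => simp
  | cons p t ih =>
    simp only [List.foldl_cons, List.filter_cons]
    by_cases h1 : p.1 < row
    · have hr : ¬ p.1 > row := by omega
      have he : ¬ (p.1 == row) = true := by simp; omega
      simp [h1, hr, he, ih]
    · by_cases h2 : p.1 > row
      · have he : ¬ (p.1 == row) = true := by simp; omega
        simp [h1, h2, he, ih]
      · have he : (p.1 == row) = true := by simp; omega
        by_cases h3 : p.2 > col
        · have h4 : ¬ p.2 < col := by omega
          simp [h1, h2, h3, h4, he, ih]
        · by_cases h4 : p.2 < col
          · simp [h1, h2, h3, h4, he, ih]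
          · have h5 : ¬ (p.2 < col) = true := by simp; omega
            simp [h1, h2, h3, h4, he, ih]

-- ===== VERDICT =====
theorem sortSides_spec : Claim_equal_sortSides := by
  intro sides row col _
  unfold Spec_sortSides sortSides sortSides_alt
  simp [sortSides_foldl]
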